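-- pv_equiv track=rewrite | github.com/nloadholtes/atl_civic_hacking | wwg_market.py | csv_to_dict
-- ===== SOURCE A (Python) =====
-- def csv_to_dict(data, key_col):
--     output = {}
--     for row in data:
--         if row[key_col] == '':
--             continue
--         key_data = output.get(row[key_col], [])
--         key_data.append(row[key_col + 1:])
--         output[row[key_col]] = key_data
--     return output
-- ===== SOURCE B (Python) =====
-- def csv_to_dict(data, key_col):
--     keys = []
--     seen = set()
--     for row in data:
--         k = row[key_col]
--         if k != '' and k not in seen:
--             seen.add(k)
--             keys.append(k)
--     return {k: [row[key_col + 1:] for row in data if row[key_col] == k] for k in keys}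
-- ===== Notes on version B (the rewrite author's own statement) =====
-- stated objective: alternative
-- what changed: Replaces the single-pass dict accumulation (get-append-reinsert per row) with a two-phase strategy: first collect the distinct non-empty keys in first-occurrence order, then build each group with one comprehension per key.
import Mathlib
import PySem

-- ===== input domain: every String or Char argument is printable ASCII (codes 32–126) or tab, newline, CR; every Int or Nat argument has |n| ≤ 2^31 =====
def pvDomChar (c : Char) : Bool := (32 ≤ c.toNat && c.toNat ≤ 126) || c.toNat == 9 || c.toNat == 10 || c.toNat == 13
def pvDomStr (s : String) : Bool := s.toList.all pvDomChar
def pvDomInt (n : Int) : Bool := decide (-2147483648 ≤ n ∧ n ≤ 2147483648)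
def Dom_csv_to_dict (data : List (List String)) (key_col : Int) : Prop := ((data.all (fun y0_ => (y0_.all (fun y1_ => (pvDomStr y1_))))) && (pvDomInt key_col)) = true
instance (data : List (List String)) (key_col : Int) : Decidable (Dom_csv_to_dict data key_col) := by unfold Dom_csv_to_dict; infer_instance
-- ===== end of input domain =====

-- B replaces A's single-pass dict accumulation by a two-phase build (distinct keys first, then one
-- comprehension per key); alternative decomposition, same return value.


-- row[key_col] (total form; exact under Pre_, which puts key_col in range for every row)
def pvKey (key_col : Int) (row : List String) : String :=
  PySem.List.pyGetD row key_col ""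

-- row[key_col + 1:]
def pvTail (key_col : Int) (row : List String) : List String :=
  PySem.List.slice row (some (key_col + 1)) none

-- ===== PORT A =====
def csv_to_dict (data : List (List String)) (key_col : Int) : List (String × List (List String)) :=
  (data.foldl (fun output row =>
      let k := pvKey key_col row
      if k = "" then output
      else output.insert k (output.getD k [] ++ [pvTail key_col row]))
    (PySem.Dict.empty : PySem.Dict String (List (List String)))).items

-- ===== PORT B =====
-- Source B's `seen` set and `keys` list always hold the same elements in the same (first-insertion)
-- order; the pair is ported as the single PySem.Set accumulator (Set.add = "if not seen: append").
def csv_to_dict_alt (data : List (List String)) (key_col : Int) : List (String × List (List String)) :=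
  let keys : PySem.Set String := data.foldl (fun s row =>
      let k := pvKey key_col row
      if k = "" then s else PySem.Set.add s k) PySem.Set.empty
  keys.map (fun k =>
    (k, (data.filter (fun row => pvKey key_col row == k)).map (pvTail key_col)))

-- ===== PRECONDITION & SPEC =====
-- Pre_: Python A evaluates row[key_col] on every row and raises IndexError when key_col is out of
-- range (Python negative indexing allowed); exactly those inputs are excluded.
def Pre_csv_to_dict (data : List (List String)) (key_col : Int) : Prop :=
  ∀ row ∈ data, PySem.Raise.InRange row.length key_col

instance (data : List (List String)) (key_col : Int) : Decidable (Pre_csv_to_dict data key_col) := by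
  unfold Pre_csv_to_dict; infer_instance

def pvWitness_csv_to_dict : List (List String) × Int :=
  ([["a", "1"], ["a", "2"], ["", "x"], ["b", "3"]], 0)

def Spec_csv_to_dict (data : List (List String)) (key_col : Int) (out : List (String × List (List String))) : Prop := out = csv_to_dict_alt data key_col
instance (data : List (List String)) (key_col : Int) (out : List (String × List (List String))) : Decidable (Spec_csv_to_dict data key_col out) := by unfold Spec_csv_to_dict; infer_instance

-- ===== CLAIM (what is proved, stated in full; the proofs are below) =====
def Claim_equal_csv_to_dict : Prop := ∀ (data : List (List String)) (key_col : Int), Dom_csv_to_dict data key_col → Pre_csv_to_dict data key_col → Spec_csv_to_dict data key_col (csv_to_dict data key_col)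

-- ===== LEMMAS AND PROOFS =====

-- A's accumulated dict over a prefix p
def pvFold (key_col : Int) (p : List (List String)) : PySem.Dict String (List (List String)) :=
  p.foldl (fun output row =>
      let k := pvKey key_col row
      if k = "" then output
      else output.insert k (output.getD k [] ++ [pvTail key_col row]))
    PySem.Dict.empty

-- B's distinct non-empty keys over a prefix p
def pvKeys (key_col : Int) (p : List (List String)) : PySem.Set String :=
  p.foldl (fun s row =>
      let k := pvKey key_col row
      if k = "" then s else PySem.Set.add s k) PySem.Set.empty

-- B's group for key k over a prefix p
def pvGrp (key_col : Int) (p : List (List String)) (k : String) : List (List String) :=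
  (p.filter (fun row => pvKey key_col row == k)).map (pvTail key_col)

lemma pvKeys_eq (key_col : Int) (p : List (List String)) :
    pvKeys key_col p =
      PySem.Set.ofList ((p.map (pvKey key_col)).filter (fun k => !(k == ""))) := by
  rw [PySem.Set.ofList_eq_foldl, List.foldl_filter, List.foldl_map]
  unfold pvKeys
  congr 1
  funext s row
  by_cases h : pvKey key_col row = "" <;> simp [h]

lemma mem_pvKeys (key_col : Int) (p : List (List String)) (k : String) :
    k ∈ pvKeys key_col p ↔ (k ≠ "" ∧ ∃ row ∈ p, pvKey key_col row = k) := by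
  rw [pvKeys_eq]
  simp only [PySem.Set.mem_ofList, List.mem_filter, List.mem_map]
  constructor
  · rintro ⟨⟨row, hrow, rfl⟩, hne⟩
    simp at hne
    exact ⟨hne, row, hrow, rfl⟩
  · rintro ⟨hne, row, hrow, rfl⟩
    exact ⟨⟨row, hrow, rfl⟩, by simpa using hne⟩

lemma nodup_pvKeys (key_col : Int) (p : List (List String)) : (pvKeys key_col p).Nodup := by
  rw [pvKeys_eq]; exact PySem.Set.nodup_ofList _

lemma pvGrp_append_singleton (key_col : Int) (p : List (List String)) (r : List String) (k : String) :
    pvGrp key_col (p ++ [r]) k =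
      pvGrp key_col p k ++ (if pvKey key_col r == k then [pvTail key_col r] else []) := by
  unfold pvGrp
  rw [List.filter_append, List.map_append]
  by_cases h : pvKey key_col r == k <;> simp [h]

-- the main invariant: A's dict items over any prefix are B's key list paired with B's groups
lemma items_pvFold (key_col : Int) (p : List (List String)) :
    (pvFold key_col p).items = (pvKeys key_col p).map (fun k => (k, pvGrp key_col p k)) := by
  induction p using List.reverseRecOn with
  | nil => rfl
  | append_singleton p r ih =>
    have hfold : pvFold key_col (p ++ [r]) =
        (let k := pvKey key_col r
         if k = "" then pvFold key_col p
         else (pvFold key_col p).insert k ((pvFold key_col p).getD k [] ++ [pvTail key_col r])) := by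
      unfold pvFold; rw [List.foldl_append]; rfl
    have hkeys : pvKeys key_col (p ++ [r]) =
        (let k := pvKey key_col r
         if k = "" then pvKeys key_col p else PySem.Set.add (pvKeys key_col p) k) := by
      unfold pvKeys; rw [List.foldl_append]; rfl
    have hdkeys : (pvFold key_col p).keys = pvKeys key_col p := by
      simp [PySem.Dict.keys, ih, Function.comp_def]
    by_cases h0 : pvKey key_col r = ""
    · rw [hfold, hkeys]
      simp only [h0, if_true]
      rw [ih]
      apply List.map_congr_left
      intro k hk
      have hkne : k ≠ "" := ((mem_pvKeys key_col p k).1 hk).1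
      rw [pvGrp_append_singleton]
      have : (pvKey key_col r == k) = false := by
        rw [h0, beq_eq_false_iff_ne]
        exact fun h => hkne h.symm
      simp [this]
    · set k0 := pvKey key_col r with hk0
      rw [hfold, hkeys]
      simp only [if_neg h0]
      have hnd : (pvFold key_col p).keys.Nodup := by rw [hdkeys]; exact nodup_pvKeys _ _
      by_cases hmem : k0 ∈ pvKeys key_col p
      · -- key already present: in-place overwrite, key list unchanged
        have hcont : (pvFold key_col p).contains k0 = true := by
          rw [PySem.Dict.contains_iff_mem_keys, hdkeys]; exact hmem
        have hitem : (k0, pvGrp key_col p k0) ∈ (pvFold key_col p).items := by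
          rw [ih]
          exact List.mem_map_of_mem hmem
        have hgetD : (pvFold key_col p).getD k0 [] = pvGrp key_col p k0 :=
          PySem.Dict.getD_of_mem_items _ hitem hnd []
        rw [PySem.Set.add_of_mem hmem,
            PySem.Dict.items_insert_of_contains _ _ hcont, ih, List.map_map]
        apply List.map_congr_left
        intro k hk
        rw [pvGrp_append_singleton]
        by_cases hkk : k = k0
        · subst hkk
          simp [hk0]
          rw [← hk0]
          exact hgetD
        · have h2 : (pvKey key_col r == k) = false := by
            rw [← hk0]; simp; exact fun h => (hkk h.symm).elim
          simp [h2]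
          exact fun h => absurd h hkk
      · -- fresh key: appended at the end, group so far is empty
        have hcont : (pvFold key_col p).contains k0 = false := by
          rw [← Bool.not_eq_true, PySem.Dict.contains_iff_mem_keys, hdkeys]; exact hmem
        have hgetD : (pvFold key_col p).getD k0 [] = [] :=
          PySem.Dict.getD_of_not_contains _ _ hcont
        have hgrp0 : pvGrp key_col p k0 = [] := by
          unfold pvGrp
          rw [List.filter_eq_nil_iff.2, List.map_nil]
          intro row hrow hk
          exact hmem ((mem_pvKeys key_col p k0).2 ⟨h0, row, hrow, by simpa using hk⟩)
        rw [PySem.Set.add_of_not_mem hmem,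
            PySem.Dict.items_insert_of_not_contains _ _ hcont, ih,
            List.map_append, hgetD]
        congr 1
        · apply List.map_congr_left
          intro k hk
          rw [pvGrp_append_singleton]
          have h2 : (pvKey key_col r == k) = false := by
            rw [← hk0]; simp; exact fun h => hmem (h ▸ hk)
          simp [h2]
        · simp [pvGrp_append_singleton, hk0]
          rw [← hk0]
          exact hgrp0

-- ===== VERDICT (by name: the statement is the Claim_ definition above) =====
theorem csv_to_dict_spec : Claim_equal_csv_to_dict := by
  intro data key_col _ _
  show csv_to_dict data key_col = csv_to_dict_alt data key_col
  unfold csv_to_dict csv_to_dict_alt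
  exact items_pvFold key_col data
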